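-- pv_equiv track=rewrite | github.com/yabadeer/Search-Engines-Project | BM25.py | findLongestRun
-- ===== SOURCE A (Python) =====
-- def findLongestRun(queryTerms, sentence):
--     # ChatGPT assisted with some logic errors I previously had
--     max_run = 0
--     current_run = 0
--     for word in sentence:
--         if word in queryTerms:
--             current_run += 1
--             max_run = max(max_run, current_run)
--         else:
--             current_run = 0
--     return max_run
-- ===== SOURCE B (Python) =====
-- def findLongestRun(queryTerms, sentence):
--     # Two-pointer run scan over a hashed term set: for each run start, advance j to
--     # the run's end, record its length, and jump past the separator.
--     terms = set(queryTerms)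
--     best = 0
--     i = 0
--     n = len(sentence)
--     while i < n:
--         j = i
--         while j < n and sentence[j] in terms:
--             j += 1
--         best = max(best, j - i)
--         i = j + 1
--     return best
-- ===== Notes on version B (the rewrite author's own statement) =====
-- stated objective: faster
-- what changed: Replaces the reset-counter scan with list membership by a two-pointer run scan over a hashed set: each maximal run's extent is found by an inner pointer and the outer pointer jumps past it.
import Mathlib
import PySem

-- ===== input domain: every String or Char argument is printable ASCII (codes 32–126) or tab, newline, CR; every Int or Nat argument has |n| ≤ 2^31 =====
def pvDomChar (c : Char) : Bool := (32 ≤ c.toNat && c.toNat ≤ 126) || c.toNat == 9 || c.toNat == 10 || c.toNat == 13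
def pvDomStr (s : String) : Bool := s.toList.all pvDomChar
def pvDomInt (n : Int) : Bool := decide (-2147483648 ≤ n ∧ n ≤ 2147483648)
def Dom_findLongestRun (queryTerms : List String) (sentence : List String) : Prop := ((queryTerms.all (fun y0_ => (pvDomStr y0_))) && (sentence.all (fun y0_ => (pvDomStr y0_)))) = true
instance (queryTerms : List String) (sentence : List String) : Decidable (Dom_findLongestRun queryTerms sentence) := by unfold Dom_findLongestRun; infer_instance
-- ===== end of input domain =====

-- B replaces A's reset-counter scan (list membership per word) by a two-pointer run scan over a set.

-- ===== PORT A =====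
def findLongestRun (queryTerms : List String) (sentence : List String) : Int :=
  -- (max_run, current_run) carried as a pair through the loop
  (sentence.foldl
    (fun (st : Int × Int) word =>
      if queryTerms.contains word then (max st.1 (st.2 + 1), st.2 + 1)
      else (st.1, 0))
    (0, 0)).1

-- ===== PORT B =====
-- inner 'while j < n and sentence[j] in terms: j += 1' (fuel makes the while total;
-- it is called with fuel = n, enough for every iteration; the getD default is never read: j < n = len)
def findLongestRun_altScan (terms : List String) (sentence : List String) (n : Nat) :
    Nat → Nat → Nat
  | 0, j => j
  | fuel + 1, j =>
    if j < n ∧ PySem.Set.contains terms (sentence.getD j "") then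
      findLongestRun_altScan terms sentence n fuel (j + 1)
    else j

-- outer 'while i < n' loop: scan the run starting at i, record its length, jump past it
def findLongestRun_altLoop (terms : List String) (sentence : List String) (n : Nat) :
    Nat → Int → Nat → Int
  | 0, best, _ => best
  | fuel + 1, best, i =>
    if i < n then
      let j := findLongestRun_altScan terms sentence n n i
      findLongestRun_altLoop terms sentence n fuel (max best ((j : Int) - (i : Int))) (j + 1)
    else best

def findLongestRun_alt (queryTerms : List String) (sentence : List String) : Int :=
  let terms := PySem.Set.ofList queryTerms
  findLongestRun_altLoop terms sentence sentence.length sentence.length 0 0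

-- ===== PRECONDITION & SPEC =====
def Spec_findLongestRun (queryTerms : List String) (sentence : List String) (out : Int) : Prop := out = findLongestRun_alt queryTerms sentence
instance (queryTerms : List String) (sentence : List String) (out : Int) : Decidable (Spec_findLongestRun queryTerms sentence out) := by unfold Spec_findLongestRun; infer_instance

-- ===== CLAIM (what is proved, stated in full; the proofs are below) =====
def Claim_equal_findLongestRun : Prop := ∀ (queryTerms : List String) (sentence : List String), Dom_findLongestRun queryTerms sentence → Spec_findLongestRun queryTerms sentence (findLongestRun queryTerms sentence)

-- ===== LEMMAS AND PROOFS =====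

-- length of the leading run of p-satisfying words
def pvLead (p : String → Bool) (l : List String) : Nat := (l.takeWhile p).length

-- reference value: longest run of p-satisfying words, by leading-run decomposition
def pvRef (p : String → Bool) : List String → Int
  | [] => 0
  | w :: ws =>
    max ((pvLead p (w :: ws) : Nat) : Int) (pvRef p ((w :: ws).drop (pvLead p (w :: ws) + 1)))
termination_by l => l.length
decreasing_by simp only [pvLead, List.length_drop, List.length_cons]; omega

theorem pvRef_nil (p : String → Bool) : pvRef p [] = 0 := by rw [pvRef.eq_def]

theorem pvRef_cons (p : String → Bool) (w : String) (ws : List String) :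
    pvRef p (w :: ws)
      = max ((pvLead p (w :: ws) : Nat) : Int) (pvRef p ((w :: ws).drop (pvLead p (w :: ws) + 1))) := by
  rw [pvRef.eq_def]

theorem pvRef_nonneg (p : String → Bool) (l : List String) : 0 ≤ pvRef p l := by
  induction l using pvRef.induct p with
  | case1 => rw [pvRef_nil]
  | case2 w ws ih => rw [pvRef_cons]; positivity

theorem pvLead_cons_pos (p : String → Bool) (w : String) (ws : List String) (h : p w = true) :
    pvLead p (w :: ws) = pvLead p ws + 1 := by
  simp [pvLead, h]

theorem pvLead_cons_neg (p : String → Bool) (w : String) (ws : List String) (h : p w = false) :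
    pvLead p (w :: ws) = 0 := by
  simp [pvLead, h]

-- A's fold, characterised against pvRef: the current run c still extends by the leading run
theorem foldA_eq (p : String → Bool) (l : List String) :
    ∀ (m c : Int), 0 ≤ c → c ≤ m →
    (l.foldl (fun (st : Int × Int) word =>
        if p word then (max st.1 (st.2 + 1), st.2 + 1) else (st.1, 0)) (m, c)).1
      = max m (max (c + (pvLead p l : Int)) (pvRef p (l.drop (pvLead p l + 1)))) := by
  induction l with
  | nil =>
    intro m c hc hcm
    have h0 : pvLead p [] = 0 := rfl
    rw [List.foldl_nil, h0]
    have h1 : ([] : List String).drop (0 + 1) = [] := rfl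
    rw [h1, pvRef_nil]
    omega
  | cons w ws ih =>
    intro m c hc hcm
    by_cases hw : p w = true
    · rw [List.foldl_cons]
      simp only [hw, if_pos]
      rw [ih (max m (c + 1)) (c + 1) (by omega) (by omega)]
      rw [pvLead_cons_pos p w ws hw]
      have hdrop : (w :: ws).drop (pvLead p ws + 1 + 1) = ws.drop (pvLead p ws + 1) := rfl
      rw [hdrop]
      push_cast
      omega
    · rw [List.foldl_cons]
      simp only [hw, if_neg, Bool.false_eq_true, not_false_iff]
      rw [ih m 0 le_rfl (by omega)]
      rw [pvLead_cons_neg p w ws (by simpa using hw)]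
      have hdrop : (w :: ws).drop (0 + 1) = ws := rfl
      rw [hdrop]
      cases ws with
      | nil =>
        have h0 : pvLead p [] = 0 := rfl
        rw [h0]
        have h1 : ([] : List String).drop (0 + 1) = [] := rfl
        rw [h1, pvRef_nil]
        omega
      | cons w2 ws2 =>
        have h1 := pvRef_cons p w2 ws2
        have h2 := pvRef_nonneg p ((w2 :: ws2).drop (pvLead p (w2 :: ws2) + 1))
        omega

theorem findLongestRun_eq_ref (queryTerms sentence : List String) :
    findLongestRun queryTerms sentence = pvRef (fun w => queryTerms.contains w) sentence := by
  unfold findLongestRun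
  rw [foldA_eq (fun w => queryTerms.contains w) sentence 0 0 le_rfl le_rfl]
  cases sentence with
  | nil =>
    have h0 : pvLead (fun w => queryTerms.contains w) [] = 0 := rfl
    rw [h0]
    have h1 : ([] : List String).drop (0 + 1) = [] := rfl
    rw [h1, pvRef_nil]
    omega
  | cons w ws =>
    have h1 := pvRef_cons (fun w => queryTerms.contains w) w ws
    have h2 := pvRef_nonneg (fun w => queryTerms.contains w)
      ((w :: ws).drop (pvLead (fun w => queryTerms.contains w) (w :: ws) + 1))
    omega

-- B's inner while = leading-run length of the remaining suffix
theorem altScan_eq (terms sentence : List String) (n : Nat) (hn : n = sentence.length) :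
    ∀ (fuel j : Nat), j ≤ n → n - j ≤ fuel →
    findLongestRun_altScan terms sentence n fuel j
      = j + pvLead (fun w => PySem.Set.contains terms w) (sentence.drop j) := by
  intro fuel
  induction fuel with
  | zero =>
    intro j hj hfuel
    have hjeq : j = n := by omega
    subst hjeq
    rw [findLongestRun_altScan, List.drop_eq_nil_of_le (by omega)]
    have h0 : pvLead (fun w => PySem.Set.contains terms w) [] = 0 := rfl
    rw [h0]
    omega
  | succ fuel ihf =>
    intro j hj hfuel
    rw [findLongestRun_altScan]
    by_cases hjn : j < n
    · have hdrop : sentence.drop j = sentence[j] :: sentence.drop (j + 1) :=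
        List.drop_eq_getElem_cons (by omega)
      have hget : sentence.getD j "" = sentence[j] := List.getD_eq_getElem sentence "" (by omega)
      cases hmem : PySem.Set.contains terms (sentence.getD j "") with
      | true =>
        rw [if_pos ⟨hjn, rfl⟩]
        rw [ihf (j + 1) (by omega) (by omega)]
        rw [hdrop, pvLead_cons_pos _ _ _ (by rw [← hget]; exact hmem)]
        omega
      | false =>
        rw [if_neg (fun hcon => by simpa using hcon.2)]
        rw [hdrop, pvLead_cons_neg _ _ _ (by rw [← hget]; exact hmem)]
        omega
    · rw [if_neg (by intro hcon; exact hjn hcon.1)]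
      have hjeq : j = n := by omega
      subst hjeq
      rw [List.drop_eq_nil_of_le (by omega)]
      have h0 : pvLead (fun w => PySem.Set.contains terms w) [] = 0 := rfl
      rw [h0]
      omega

-- B's outer while = running max against pvRef of the remaining suffix (induction on the fuel)
theorem altLoop_eq (terms sentence : List String) (n : Nat) (hn : n = sentence.length) :
    ∀ (fuel : Nat) (best : Int) (i : Nat), n - i ≤ fuel → 0 ≤ best →
    findLongestRun_altLoop terms sentence n fuel best i
      = max best (pvRef (fun w => PySem.Set.contains terms w) (sentence.drop i)) := by
  intro fuel
  induction fuel with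
  | zero =>
    intro best i hk hbest
    rw [findLongestRun_altLoop]
    rw [List.drop_eq_nil_of_le (by omega), pvRef_nil]
    omega
  | succ fuel ihk =>
    intro best i hk hbest
    by_cases hi : i < n
    · have hstep : findLongestRun_altLoop terms sentence n (fuel + 1) best i
          = findLongestRun_altLoop terms sentence n fuel
              (max best ((findLongestRun_altScan terms sentence n n i : Int) - (i : Int)))
              (findLongestRun_altScan terms sentence n n i + 1) := by
        rw [findLongestRun_altLoop]; exact if_pos hi
      have hscan := altScan_eq terms sentence n hn n i (by omega) (by omega)
      have hpos : (0 : Int) ≤ max best ((findLongestRun_altScan terms sentence n n i : Int) - (i : Int)) :=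
        le_max_of_le_left hbest
      have hih := ihk (max best ((findLongestRun_altScan terms sentence n n i : Int) - (i : Int)))
        (findLongestRun_altScan terms sentence n n i + 1) (by omega) hpos
      have hne : sentence.drop i ≠ [] := by
        intro hcon
        have := List.drop_eq_nil_iff.mp hcon
        omega
      obtain ⟨w, ws, hws⟩ := List.exists_cons_of_ne_nil hne
      have href := pvRef_cons (fun w => PySem.Set.contains terms w) w ws
      rw [← hws] at href
      have hdd : (sentence.drop i).drop
            (pvLead (fun w => PySem.Set.contains terms w) (sentence.drop i) + 1)
          = sentence.drop (findLongestRun_altScan terms sentence n n i + 1) := by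
        rw [List.drop_drop]; congr 1; omega
      rw [hdd] at href
      have hnn := pvRef_nonneg (fun w => PySem.Set.contains terms w)
        (sentence.drop (findLongestRun_altScan terms sentence n n i + 1))
      rw [hstep, hih]
      omega
    · rw [findLongestRun_altLoop, if_neg hi]
      rw [List.drop_eq_nil_of_le (by omega), pvRef_nil]
      omega

theorem set_contains_ofList (qs : List String) (w : String) :
    PySem.Set.contains (PySem.Set.ofList qs) w = qs.contains w := by
  simp [PySem.Set.contains, PySem.Set.mem_ofList]

theorem findLongestRun_alt_eq_ref (queryTerms sentence : List String) :
    findLongestRun_alt queryTerms sentence = pvRef (fun w => queryTerms.contains w) sentence := by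
  unfold findLongestRun_alt
  rw [altLoop_eq _ sentence sentence.length rfl sentence.length 0 0 (by omega) le_rfl]
  rw [List.drop_zero]
  have hfun : (fun w => PySem.Set.contains (PySem.Set.ofList queryTerms) w)
      = (fun w => queryTerms.contains w) := by
    funext w; exact set_contains_ofList queryTerms w
  rw [hfun]
  have := pvRef_nonneg (fun w => queryTerms.contains w) sentence
  omega

-- ===== VERDICT (by name: the statement is the Claim_ definition above) =====
theorem findLongestRun_spec : Claim_equal_findLongestRun := by
  intro queryTerms sentence _
  unfold Spec_findLongestRun
  rw [findLongestRun_eq_ref, findLongestRun_alt_eq_ref]
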